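-- pv_equiv track=rewrite | github.com/ashutosh-narkar/LeetCode | min_window.py | check_seq_in_ngram
-- ===== SOURCE A (Python) =====
-- def check_seq_in_ngram(seq, ngram):
--
--     # When a seq char matches a ngram char
--     # we need to remove it
--     # eg.  word = 'acbbaab'  seq = 'aab'  expected = 'baa'
--     # we will get 'acb' if we do not remove matched chars
--     # Also we need to preserve the original ngram
--
--     #temp = ngram
--     #for i in seq:
--     #    if i not in temp:
--     #        return False
--     #    else:
--     #        temp = temp.replace(i, '', 1)
--     #return True
--
--     # we only need to check if all chars in 'seq' are in ngram
--     # we DO NOT need the actual substring here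
--     # This is modified ANAGRAM problem
--
--     word_count = {}
--
--     for i in ngram:
--         if i in word_count:
--             word_count[i] += 1
--         else:
--             word_count[i] = 1
--
--
--     for i in seq:
--         if i not in word_count:
--             return False
--
--         word_count[i] -= 1
--         if word_count[i] == 0:
--             del(word_count[i])
--
--     return True
-- ===== SOURCE B (Python) =====
-- def check_seq_in_ngram(seq, ngram):
--     # sort both strings, then one ordered two-pointer walk: each char of the
--     # sorted seq must be found in order in the sorted ngram
--     sa = sorted(seq)
--     sn = sorted(ngram)
--     n = len(sn)
--     j = 0
--     for ch in sa:
--         while j < n and sn[j] < ch: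
--             j += 1
--         if j == n or sn[j] != ch:
--             return False
--         j += 1
--     return True
-- ===== Notes on version B (the rewrite author's own statement) =====
-- stated objective: alternative
-- what changed: Replaced the frequency-dict build-and-decrement passes with sorting both strings and a single two-pointer ordered merge walk that matches each seq char against the sorted ngram.
import Mathlib
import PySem

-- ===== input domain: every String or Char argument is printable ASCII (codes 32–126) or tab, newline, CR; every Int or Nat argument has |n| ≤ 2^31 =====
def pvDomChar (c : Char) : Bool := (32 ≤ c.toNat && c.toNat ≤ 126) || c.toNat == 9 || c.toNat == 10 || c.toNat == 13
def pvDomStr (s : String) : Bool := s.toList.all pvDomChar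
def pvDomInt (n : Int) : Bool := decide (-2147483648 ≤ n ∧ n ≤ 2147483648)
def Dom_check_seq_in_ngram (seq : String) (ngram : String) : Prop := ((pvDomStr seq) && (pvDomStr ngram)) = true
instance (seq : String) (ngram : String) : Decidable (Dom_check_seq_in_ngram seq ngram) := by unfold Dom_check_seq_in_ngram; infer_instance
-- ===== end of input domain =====

-- B replaces A's frequency-dict build-and-decrement passes by sorting both strings and
-- one ordered two-pointer merge walk (alternative decomposition, same return value).

-- ===== PORT A =====

def pvStepA (d : PySem.Dict Char Int) (c : Char) : PySem.Dict Char Int :=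
  if d.contains c then d.insert c (d.getD c 0 + 1) else d.insert c 1

def pvLoopA : List Char → PySem.Dict Char Int → Bool
  | [], _ => true
  | c :: rest, d =>
    if d.contains c = false then false
    else
      let d' := d.insert c (d.getD c 0 - 1)
      if d'.getD c 0 = 0 then pvLoopA rest (d'.erase c) else pvLoopA rest d'

def check_seq_in_ngram (seq : String) (ngram : String) : Bool :=
  pvLoopA seq.toList (ngram.toList.foldl pvStepA PySem.Dict.empty)

-- ===== PORT B =====
-- the two-pointer walk of Source B: first list = sorted seq still to match,
-- second list = the tail of sorted ngram from pointer j on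
def pvWalkB : List Char → List Char → Bool
  | [], _ => true
  | _ :: _, [] => false
  | a :: sa, b :: sn =>
    if b < a then pvWalkB (a :: sa) sn
    else if b = a then pvWalkB sa sn
    else false
  termination_by sa sn => sa.length + sn.length

def check_seq_in_ngram_alt (seq : String) (ngram : String) : Bool :=
  pvWalkB (PySem.List.sorted seq.toList (fun c => c) false)
          (PySem.List.sorted ngram.toList (fun c => c) false)

-- ===== PRECONDITION & SPEC =====
def Spec_check_seq_in_ngram (seq : String) (ngram : String) (out : Bool) : Prop := out = check_seq_in_ngram_alt seq ngram
instance (seq : String) (ngram : String) (out : Bool) : Decidable (Spec_check_seq_in_ngram seq ngram out) := by unfold Spec_check_seq_in_ngram; infer_instance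

-- ===== CLAIM (what is proved, stated in full; the proofs are below) =====
def Claim_equal_check_seq_in_ngram : Prop := ∀ (seq : String) (ngram : String), Dom_check_seq_in_ngram seq ngram → Spec_check_seq_in_ngram seq ngram (check_seq_in_ngram seq ngram)

-- ===== LEMMAS AND PROOFS =====
theorem pvStepA_eq : pvStepA = fun (d : PySem.Dict Char Int) c => d.insert c (d.getD c 0 + 1) := by
  funext d c
  by_cases h : d.contains c = true
  · simp [pvStepA, h]
  · have h' : d.contains c = false := by simpa using h
    rw [pvStepA, if_neg (by simp [h']), PySem.Dict.getD_of_not_contains _ _ h']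
    simp

theorem pvBuildA_getD (l : List Char) (c : Char) :
    (l.foldl pvStepA PySem.Dict.empty).getD c 0 = (l.count c : Int) := by
  rw [pvStepA_eq, PySem.Dict.getD_foldl_insert_add_one, PySem.Dict.getD_empty]
  simp

theorem pvFind?_filter_erase {k k' : Char} (l : List (Char × Int)) :
    List.find? (fun p => p.1 == k') (l.filter (fun p => !p.1 == k))
      = if k' = k then none else List.find? (fun p => p.1 == k') l := by
  induction l with
  | nil => simp
  | cons p t ih =>
    by_cases hk : p.1 = k
    · by_cases h' : k' = k
      · simp [List.filter_cons, hk, h', ih]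
      · have hpk : ¬ p.1 = k' := fun e => h' (by rw [← e, hk])
        rw [List.find?_cons_of_neg (by simp [hpk])]
        simp [List.filter_cons, hk, h', ih]
    · by_cases h1 : p.1 = k'
      · have hne : ¬ k' = k := fun e => hk (e ▸ h1)
        simp [List.filter_cons, hk, h1, hne]
      · simp [List.filter_cons, hk, h1, ih]

theorem pvGet?_erase (d : PySem.Dict Char Int) (k k' : Char) :
    (d.erase k).get? k' = if k' = k then none else d.get? k' := by
  simp only [PySem.Dict.erase, PySem.Dict.get?]
  rw [pvFind?_filter_erase]
  split <;> rfl

theorem pvGetD_erase (d : PySem.Dict Char Int) (k k' : Char) :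
    (d.erase k).getD k' 0 = if k' = k then 0 else d.getD k' 0 := by
  simp only [PySem.Dict.getD, pvGet?_erase]
  split <;> rfl

theorem pvContains_erase (d : PySem.Dict Char Int) (k k' : Char) :
    (d.erase k).contains k' = if k' = k then false else d.contains k' := by
  rw [PySem.Dict.contains_eq_isSome_get?, pvGet?_erase, PySem.Dict.contains_eq_isSome_get?]
  split <;> rfl

theorem pvLoopA_iff (l : List Char) (d : PySem.Dict Char Int)
    (hpos : ∀ c, d.contains c = true → 1 ≤ d.getD c 0) :
    pvLoopA l d = true ↔ ∀ c, (l.count c : Int) ≤ d.getD c 0 := by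
  induction l generalizing d with
  | nil =>
    simp only [pvLoopA, true_iff]
    intro c
    by_cases h : d.contains c = true
    · have := hpos c h; simp; omega
    · rw [PySem.Dict.getD_of_not_contains _ _ (by simpa using h)]; simp
  | cons c rest ih =>
    by_cases h : d.contains c = true
    · simp only [pvLoopA, if_neg (by simp [h] : ¬ d.contains c = false)]
      by_cases hz : (d.insert c (d.getD c 0 - 1)).getD c 0 = 0
      · have hv : d.getD c 0 = 1 := by
          rw [PySem.Dict.getD_insert_self] at hz; omega
        rw [if_pos hz]
        have hpos' : ∀ c', ((d.insert c (d.getD c 0 - 1)).erase c).contains c' = true →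
            1 ≤ ((d.insert c (d.getD c 0 - 1)).erase c).getD c' 0 := by
          intro c' hc
          rw [pvContains_erase] at hc
          rw [pvGetD_erase]
          by_cases e : c' = c
          · simp [e] at hc
          · rw [if_neg e] at hc ⊢
            rw [PySem.Dict.contains_insert] at hc
            simp [e] at hc
            rw [PySem.Dict.getD_insert_of_ne _ _ _ e]
            exact hpos c' hc
        rw [ih _ hpos']
        constructor
        · intro hall c'
          by_cases hc : c' = c
          · subst hc
            have := hall c'
            rw [pvGetD_erase, if_pos rfl] at this
            simp [List.count_cons, hv]
            omega
          · have := hall c'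
            rw [pvGetD_erase, if_neg hc, PySem.Dict.getD_insert_of_ne _ _ _ hc] at this
            simp [List.count_cons, hc, Ne.symm hc] at this ⊢
            omega
        · intro hall c'
          by_cases hc : c' = c
          · subst hc
            have := hall c'
            rw [pvGetD_erase, if_pos rfl]
            simp [List.count_cons] at this ⊢
            omega
          · have := hall c'
            rw [pvGetD_erase, if_neg hc, PySem.Dict.getD_insert_of_ne _ _ _ hc]
            simp [List.count_cons, hc, Ne.symm hc] at this ⊢
            omega
      · rw [if_neg hz]
        rw [PySem.Dict.getD_insert_self] at hz
        have hd1 : 1 ≤ d.getD c 0 := hpos c h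
        have hpos' : ∀ c', (d.insert c (d.getD c 0 - 1)).contains c' = true →
            1 ≤ (d.insert c (d.getD c 0 - 1)).getD c' 0 := by
          intro c' hc
          by_cases e : c' = c
          · subst e; rw [PySem.Dict.getD_insert_self]; omega
          · rw [PySem.Dict.getD_insert_of_ne _ _ _ e]
            rw [PySem.Dict.contains_insert] at hc
            simp [e] at hc
            exact hpos c' hc
        rw [ih _ hpos']
        constructor
        · intro hall c'
          by_cases hc : c' = c
          · subst hc
            have := hall c'
            rw [PySem.Dict.getD_insert_self] at this
            simp [List.count_cons] at this ⊢
            omega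
          · have := hall c'
            rw [PySem.Dict.getD_insert_of_ne _ _ _ hc] at this
            simp [List.count_cons, hc, Ne.symm hc] at this ⊢
            omega
        · intro hall c'
          by_cases hc : c' = c
          · subst hc
            have := hall c'
            rw [PySem.Dict.getD_insert_self]
            simp [List.count_cons] at this ⊢
            omega
          · have := hall c'
            rw [PySem.Dict.getD_insert_of_ne _ _ _ hc]
            simp [List.count_cons, hc, Ne.symm hc] at this ⊢
            omega
    · simp only [pvLoopA, if_pos (by simpa using h : d.contains c = false), Bool.false_eq_true, false_iff]
      intro hall
      have := hall c
      rw [PySem.Dict.getD_of_not_contains _ _ (by simpa using h)] at this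
      simp [List.count_cons] at this
      omega

theorem pvWalkB_iff (sn sa : List Char)
    (ha : sa.Pairwise (· ≤ ·)) (hn : sn.Pairwise (· ≤ ·)) :
    pvWalkB sa sn = true ↔ ∀ c, sa.count c ≤ sn.count c := by
  induction sn generalizing sa with
  | nil =>
    cases sa with
    | nil => simp [pvWalkB]
    | cons a t =>
      simp only [pvWalkB, Bool.false_eq_true, false_iff]
      intro hall
      have := hall a
      simp [List.count_cons] at this
  | cons b sn ih =>
    cases sa with
    | nil => simp [pvWalkB]
    | cons a sa' =>
      have ha' : sa'.Pairwise (· ≤ ·) := ha.tail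
      have hn' : sn.Pairwise (· ≤ ·) := hn.tail
      by_cases hba : b < a
      · have hnotmem : b ∉ a :: sa' := by
          intro hm
          rcases List.mem_cons.mp hm with h1 | h1
          · exact absurd (h1 ▸ hba) (lt_irrefl b)
          · exact absurd (lt_of_lt_of_le hba (List.rel_of_pairwise_cons ha h1)) (lt_irrefl b)
        rw [pvWalkB, if_pos hba, ih _ ha hn']
        constructor
        · intro hall c
          rcases eq_or_ne c b with rfl | hc
          · simp [List.count_eq_zero_of_not_mem hnotmem]
          · have := hall c
            simp [List.count_cons, Ne.symm hc] at this ⊢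
            omega
        · intro hall c
          have := hall c
          rcases eq_or_ne c b with rfl | hc
          · simp [List.count_eq_zero_of_not_mem hnotmem]
          · simp [List.count_cons, Ne.symm hc] at this ⊢
            omega
      · by_cases hbe : b = a
        · subst hbe
          rw [pvWalkB, if_neg hba, if_pos rfl, ih _ ha' hn']
          constructor
          · intro hall c
            have := hall c
            by_cases hc : c = b <;> simp [List.count_cons, hc] at this ⊢ <;> omega
          · intro hall c
            have := hall c
            by_cases hc : c = b <;> simp [List.count_cons, hc] at this ⊢ <;> omega
        · have hab : a < b := lt_of_le_of_ne (not_lt.mp hba) (Ne.symm hbe)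
          have hnotmem : a ∉ b :: sn := by
            intro hm
            rcases List.mem_cons.mp hm with h1 | h1
            · exact absurd (h1 ▸ hab) (lt_irrefl a)
            · exact absurd (lt_of_lt_of_le hab (List.rel_of_pairwise_cons hn h1)) (lt_irrefl a)
          rw [pvWalkB, if_neg hba, if_neg hbe]
          simp only [Bool.false_eq_true, false_iff]
          intro hall
          have := hall a
          rw [List.count_eq_zero_of_not_mem hnotmem] at this
          simp [List.count_cons] at this

theorem pvBuildA_pos (l : List Char) :
    ∀ c, (l.foldl pvStepA PySem.Dict.empty).contains c = true →
      1 ≤ (l.foldl pvStepA PySem.Dict.empty).getD c 0 := by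
  have hmem : ∀ (l : List Char) (d : PySem.Dict Char Int) c,
      (l.foldl pvStepA d).contains c = true → d.contains c = true ∨ c ∈ l := by
    intro l
    induction l with
    | nil => intro d c h; exact Or.inl h
    | cons x t ih =>
      intro d c h
      rcases ih _ c h with h1 | h1
      · rw [pvStepA_eq] at h1
        rw [PySem.Dict.contains_insert] at h1
        rcases Bool.or_eq_true_iff.mp h1 with h2 | h2
        · exact Or.inr (by simp [beq_iff_eq.mp h2])
        · exact Or.inl h2
      · exact Or.inr (List.mem_cons_of_mem _ h1)
  intro c h
  rw [pvBuildA_getD]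
  rcases hmem l PySem.Dict.empty c h with h1 | h1
  · rw [PySem.Dict.contains_empty] at h1; exact absurd h1 (by simp)
  · have := List.count_pos_iff.mpr h1
    omega

-- ===== VERDICT (by name: the statement is the Claim_ definition above) =====
theorem check_seq_in_ngram_spec : Claim_equal_check_seq_in_ngram := by
  intro seq ngram _
  unfold Spec_check_seq_in_ngram check_seq_in_ngram check_seq_in_ngram_alt
  rw [Bool.eq_iff_iff, pvLoopA_iff _ _ (pvBuildA_pos ngram.toList),
      pvWalkB_iff _ _ (by simpa using PySem.List.sorted_pairwise seq.toList (fun c => c))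
        (by simpa using PySem.List.sorted_pairwise ngram.toList (fun c => c))]
  constructor
  · intro h c
    have := h c
    rw [pvBuildA_getD] at this
    rw [(PySem.List.sorted_perm seq.toList (fun c => c) false).count_eq,
        (PySem.List.sorted_perm ngram.toList (fun c => c) false).count_eq]
    exact_mod_cast this
  · intro h c
    have := h c
    rw [(PySem.List.sorted_perm seq.toList (fun c => c) false).count_eq,
        (PySem.List.sorted_perm ngram.toList (fun c => c) false).count_eq] at this
    rw [pvBuildA_getD]
    exact_mod_cast this
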